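-- pv_equiv track=rewrite | github.com/MrBrantCode/unitest_baseline | mut_generate/mist_train_cf/cf_56651/solution.py | custom_concatenate
-- ===== SOURCE A (Python) =====
-- from typing import List
--
-- def custom_concatenate(strings: List[str]) -> str:
--     if not strings:
--         return ""
--
--     max_len = max(len(s) for s in strings)
--     result = []
--
--     for i in range(max_len):
--         for s in strings:
--             if len(s) > i:
--                 result.append(s[-(i + 1)])
--
--     return ''.join(result)
-- ===== SOURCE B (Python) =====
-- from typing import List
--
-- def custom_concatenate(strings: List[str]) -> str:
--     # Bucket each string's characters (read from the end) by their
--     # offset, in one pass, then emit the buckets in offset order.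
--     cols = {}
--     for s in strings:
--         for i, ch in enumerate(reversed(s)):
--             cols.setdefault(i, []).append(ch)
--     max_len = max(map(len, strings), default=0)
--     return ''.join(''.join(cols.get(i, [])) for i in range(max_len))
-- ===== Notes on version B (the rewrite author's own statement) =====
-- stated objective: alternative
-- what changed: Replaces A's max_len full passes over the string list (one pass per character position) with a single pass over all characters that buckets each string's characters by offset-from-the-end into a dict, then emits the buckets in offset order.
import Mathlib
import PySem

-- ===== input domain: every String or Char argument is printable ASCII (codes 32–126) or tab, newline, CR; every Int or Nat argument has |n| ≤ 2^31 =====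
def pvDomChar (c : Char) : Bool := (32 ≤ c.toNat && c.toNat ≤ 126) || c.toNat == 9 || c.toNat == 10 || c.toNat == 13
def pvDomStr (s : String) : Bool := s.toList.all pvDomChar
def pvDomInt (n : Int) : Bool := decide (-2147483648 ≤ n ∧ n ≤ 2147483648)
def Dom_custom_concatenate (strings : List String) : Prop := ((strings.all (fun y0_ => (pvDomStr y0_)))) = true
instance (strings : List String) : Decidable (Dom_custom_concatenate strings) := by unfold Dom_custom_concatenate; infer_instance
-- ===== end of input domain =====

-- B builds all output columns in one pass over the characters (bucketing by offset-from-the-end) instead of re-scanning the whole string list once per position.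

-- ===== PORT A =====
def custom_concatenate (strings : List String) : String :=
  if strings = [] then "" else
    let maxLen : Int :=
      (PySem.List.max? (strings.map (fun s => PySem.Str.len s)) (fun x => x)).getD 0
    let result : List Char :=
      (PySem.List.pyRange 0 maxLen).foldl (fun acc i =>
        strings.foldl (fun acc s =>
          if i < PySem.Str.len s then
            acc ++ (PySem.Str.pyGet? s (-(i + 1))).toList
          else acc) acc) []
    String.ofList result

-- ===== PORT B =====
def custom_concatenate_alt (strings : List String) : String :=
  let cols : PySem.Dict Int (List Char) :=
    strings.foldl (fun d s =>
      (PySem.List.enumerate s.toList.reverse).foldl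
        (fun d p => d.modify p.1 [] (fun x => x ++ [p.2])) d)
      PySem.Dict.empty
  let maxLen : Int :=
    PySem.List.maxD (strings.map (fun s => PySem.Str.len s)) (fun x => x) 0
  String.ofList (((PySem.List.pyRange 0 maxLen).map (fun i => cols.getD i [])).flatten)

-- ===== PRECONDITION & SPEC =====
def Spec_custom_concatenate (strings : List String) (out : String) : Prop := out = custom_concatenate_alt strings
instance (strings : List String) (out : String) : Decidable (Spec_custom_concatenate strings out) := by unfold Spec_custom_concatenate; infer_instance

-- ===== CLAIM (what is proved, stated in full; the proofs are below) =====
def Claim_equal_custom_concatenate : Prop := ∀ (strings : List String), Dom_custom_concatenate strings → Spec_custom_concatenate strings (custom_concatenate strings)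

-- ===== LEMMAS AND PROOFS =====

-- flatten B's nested fold into one fold over the flattened pair list
theorem foldl_enum_flatMap (l : List String) (d : PySem.Dict Int (List Char)) :
    l.foldl (fun d s =>
      (PySem.List.enumerate s.toList.reverse).foldl
        (fun d p => d.modify p.1 [] (fun x => x ++ [p.2])) d) d
    = (l.flatMap (fun s => PySem.List.enumerate s.toList.reverse)).foldl
        (fun d p => d.modify p.1 [] (fun x => x ++ [p.2])) d := by
  induction l generalizing d with
  | nil => rfl
  | cons s t ih => simp [List.flatMap_cons, List.foldl_append, ih]

-- the chars filed under key i by one string are exactly its i-th-from-the-end char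
theorem filter_enumerate_eq (cs : List Char) (s i : Int) :
    ((PySem.List.enumerate cs s).filter (fun p => p.1 == i)).map (fun p => p.2)
    = if s ≤ i then (cs[(i - s).toNat]?).toList else [] := by
  induction cs generalizing s with
  | nil => simp [PySem.List.enumerate_nil]
  | cons c t ih =>
    rw [PySem.List.enumerate_cons]
    by_cases h : s = i
    · subst h
      simp [ih]
    · have h' : (s == i) = false := by simp [h]
      simp only [List.filter_cons, h', Bool.false_eq_true, if_false]
      rw [ih]
      by_cases hle : s ≤ i
      · have h1 : s + 1 ≤ i := by omega
        have h2 : (i - s).toNat = (i - (s + 1)).toNat + 1 := by omega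
        simp [h1, hle, h2]
      · have h1 : ¬ s + 1 ≤ i := by omega
        simp [h1, hle]

-- A's negative-index access read off the reversed character list
theorem pyGet_neg_eq_reverse (cs : List Char) (i : Int) (hi : 0 ≤ i) :
    (PySem.List.pyGet? cs (-(i + 1))).toList = (cs.reverse[i.toNat]?).toList := by
  have h1 : ¬ i ≤ -1 := by omega
  by_cases h : i.toNat < cs.length
  · have h2 : i < (cs.length : Int) := by omega
    have h3 : cs.length - (i + 1).toNat = cs.length - 1 - i.toNat := by omega
    rw [List.getElem?_reverse h]
    simp [PySem.List.pyGet?, PySem.List.pyIdx?, h1, h2, h3]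
  · have h2 : ¬ i < (cs.length : Int) := by omega
    have hnone : cs.reverse[i.toNat]? = none := by
      rw [List.getElem?_eq_none]
      simp only [List.length_reverse]
      omega
    simp [PySem.List.pyGet?, PySem.List.pyIdx?, h1, h2, hnone]

-- per-position column: A's inner scan result = B's bucket for key i
theorem column_eq (strings : List String) (i : Int) (hi : 0 ≤ i) :
    (strings.flatMap (fun s =>
        if i < PySem.Str.len s then (PySem.Str.pyGet? s (-(i + 1))).toList else []))
    = ((strings.flatMap (fun s => PySem.List.enumerate s.toList.reverse)).filter
        (fun p => p.1 == i)).map (fun p => p.2) := by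
  rw [List.filter_flatMap, List.map_flatMap]
  apply List.flatMap_congr
  intro s _
  rw [filter_enumerate_eq s.toList.reverse 0 i]
  have h0 : (0 : Int) ≤ i := hi
  simp only [h0, if_true, Int.sub_zero]
  by_cases h : i < PySem.Str.len s
  · simp only [h, if_true]
    rw [show PySem.Str.pyGet? s (-(i + 1)) = PySem.List.pyGet? s.toList (-(i + 1)) by
      simp [PySem.Str.pyGet?_eq]]
    exact pyGet_neg_eq_reverse s.toList i hi
  · simp only [h, if_false]
    have : (s.toList.reverse[i.toNat]?) = none := by
      rw [List.getElem?_eq_none]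
      simp only [List.length_reverse]
      have := PySem.Str.len_eq s
      omega
    rw [this]; rfl

-- ===== VERDICT (by name: the statement is the Claim_ definition above) =====
theorem custom_concatenate_spec : Claim_equal_custom_concatenate := by
  intro strings _
  unfold Spec_custom_concatenate custom_concatenate custom_concatenate_alt
  by_cases hnil : strings = []
  · subst hnil
    simp [PySem.List.maxD, PySem.List.max?, PySem.List.pyRange]
  · simp only [hnil, if_false, PySem.List.maxD]
    rw [foldl_enum_flatMap]
    -- rewrite A's nested loops into a flatMap of columns
    have hinner : ∀ (acc : List Char) (i : Int),
        strings.foldl (fun acc s =>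
          if i < PySem.Str.len s then
            acc ++ (PySem.Str.pyGet? s (-(i + 1))).toList
          else acc) acc
        = acc ++ strings.flatMap (fun s =>
            if i < PySem.Str.len s then (PySem.Str.pyGet? s (-(i + 1))).toList else []) := by
      intro acc i
      have : (fun (acc : List Char) s =>
          if i < PySem.Str.len s then
            acc ++ (PySem.Str.pyGet? s (-(i + 1))).toList
          else acc)
          = (fun acc s => acc ++
              (if i < PySem.Str.len s then (PySem.Str.pyGet? s (-(i + 1))).toList else [])) := by
        funext acc s; split <;> simp
      rw [this, PySem.List.foldl_append_eq_flatMap]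
    simp only [hinner]
    rw [PySem.List.foldl_append_eq_flatMap]
    rw [← List.flatMap_def]
    simp only [List.nil_append]
    congr 1
    apply List.flatMap_congr
    intro i hi
    have hi0 : 0 ≤ i := (PySem.List.mem_pyRange_one.mp hi).1
    rw [column_eq strings i hi0, PySem.Dict.getD_foldl_modify_append, PySem.Dict.getD_empty,
      List.nil_append]
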